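-- pv_equiv track=rewrite | github.com/jojoscholzgmailcom/Abstract_Argumentation | Abstract_Argumentation.py | generate_stable_extensions_faster
-- ===== SOURCE A (Python) =====
-- def does_set_attack(argument, current_set, attacks):
--     for attack in attacks:
--         if attack[1] == argument and attack[0] in current_set:
--             return True
--     return False
--
-- def generate_stable_extensions_faster(arguments, attacks, preferred_extensions):
--     stable_extensions = set()
--     for preferred_extension in preferred_extensions:
--         attacked = True
--         for argument in arguments:
--             if argument in preferred_extension:
--                 continue
--             if not does_set_attack(argument, preferred_extension, attacks):
--                 attacked = False
--                 break
--         if attacked: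
--             stable_extensions.add(preferred_extension)
--     return stable_extensions
-- ===== SOURCE B (Python) =====
-- def generate_stable_extensions_faster(arguments, attacks, preferred_extensions):
--     attackers = {}
--     for s, t in attacks:
--         attackers.setdefault(t, set()).add(s)
--     empty = frozenset()
--     result = set()
--     for ext in preferred_extensions:
--         members = set(ext)
--         if all(a in members or not members.isdisjoint(attackers.get(a, empty))
--                for a in arguments):
--             result.add(ext)
--     return result
-- ===== Notes on version B (the rewrite author's own statement) =====
-- stated objective: alternative
-- what changed: Replaces the per-outsider scan over attacks (helper does_set_attack) with a reverse index target->attackers built once from attacks, then decides each argument with a membership test and a set-disjointness test against the extension.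
import Mathlib
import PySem

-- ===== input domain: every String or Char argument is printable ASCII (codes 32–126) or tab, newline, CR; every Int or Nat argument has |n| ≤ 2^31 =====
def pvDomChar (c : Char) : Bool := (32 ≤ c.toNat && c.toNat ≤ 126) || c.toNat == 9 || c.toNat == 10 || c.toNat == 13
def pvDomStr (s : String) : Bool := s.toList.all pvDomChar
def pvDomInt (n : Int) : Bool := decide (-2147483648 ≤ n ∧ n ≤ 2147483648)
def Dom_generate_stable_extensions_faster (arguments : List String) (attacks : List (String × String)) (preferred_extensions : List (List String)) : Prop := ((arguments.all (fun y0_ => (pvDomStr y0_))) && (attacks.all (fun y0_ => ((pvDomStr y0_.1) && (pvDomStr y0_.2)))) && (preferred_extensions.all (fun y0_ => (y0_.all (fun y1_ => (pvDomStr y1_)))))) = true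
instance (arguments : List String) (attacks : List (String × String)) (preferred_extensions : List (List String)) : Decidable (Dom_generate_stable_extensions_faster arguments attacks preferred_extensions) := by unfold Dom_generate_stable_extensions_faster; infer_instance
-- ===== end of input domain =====

-- B replaces the per-outsider scan over attacks (helper does_set_attack) with a reverse
-- index target -> attackers built once, then membership/disjointness tests; objective: alternative.

-- ===== PORT A =====
-- 'for attack in attacks: if …: return True; return False'
def does_set_attack (argument : String) (current_set : List String) (attacks : List (String × String)) : Bool :=
  attacks.any (fun attack => attack.2 == argument && current_set.contains attack.1)

def generate_stable_extensions_faster (arguments : List String) (attacks : List (String × String)) (preferred_extensions : List (List String)) : List (List String) :=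
  preferred_extensions.foldl
    (fun (stable_extensions : PySem.Set (List String)) preferred_extension =>
      -- inner loop with break: attacked stays true iff every argument is in the
      -- extension or attacked by it
      let attacked := arguments.all (fun argument =>
        preferred_extension.contains argument ||
        does_set_attack argument preferred_extension attacks)
      if attacked then PySem.Set.add stable_extensions preferred_extension
      else stable_extensions)
    PySem.Set.empty

-- ===== PORT B =====
def generate_stable_extensions_faster_alt (arguments : List String) (attacks : List (String × String)) (preferred_extensions : List (List String)) : List (List String) :=
  -- attackers.setdefault(t, set()).add(s)  ==  attackers[t] = attackers.get(t, set()) | {s}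
  let attackers : PySem.Dict String (PySem.Set String) :=
    attacks.foldl (fun d p => PySem.Dict.modify d p.2 PySem.Set.empty (fun st => PySem.Set.add st p.1)) PySem.Dict.empty
  preferred_extensions.foldl
    (fun (result : PySem.Set (List String)) ext =>
      let members : PySem.Set String := PySem.Set.ofList ext
      if arguments.all (fun a =>
          PySem.Set.contains members a ||
          !(PySem.Set.isdisjoint members (PySem.Dict.getD attackers a PySem.Set.empty)))
      then PySem.Set.add result ext
      else result)
    PySem.Set.empty

-- ===== PRECONDITION & SPEC =====
def Spec_generate_stable_extensions_faster (arguments : List String) (attacks : List (String × String)) (preferred_extensions : List (List String)) (out : List (List String)) : Prop := out = generate_stable_extensions_faster_alt arguments attacks preferred_extensions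
instance (arguments : List String) (attacks : List (String × String)) (preferred_extensions : List (List String)) (out : List (List String)) : Decidable (Spec_generate_stable_extensions_faster arguments attacks preferred_extensions out) := by unfold Spec_generate_stable_extensions_faster; infer_instance

-- ===== CLAIM (what is proved, stated in full; the proofs are below) =====
def Claim_equal_generate_stable_extensions_faster : Prop := ∀ (arguments : List String) (attacks : List (String × String)) (preferred_extensions : List (List String)), Dom_generate_stable_extensions_faster arguments attacks preferred_extensions → Spec_generate_stable_extensions_faster arguments attacks preferred_extensions (generate_stable_extensions_faster arguments attacks preferred_extensions)

-- ===== LEMMAS AND PROOFS =====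

-- membership in B's reverse index: s attacks a according to some pair of the processed list
theorem pv_mem_attackers (attacks : List (String × String)) (d : PySem.Dict String (PySem.Set String)) (a s : String) :
    (s ∈ PySem.Dict.getD (attacks.foldl (fun d p => PySem.Dict.modify d p.2 PySem.Set.empty (fun st => PySem.Set.add st p.1)) d) a PySem.Set.empty
      ↔ s ∈ PySem.Dict.getD d a PySem.Set.empty ∨ ∃ p ∈ attacks, p.1 = s ∧ p.2 = a) := by
  induction attacks generalizing d with
  | nil => simp
  | cons p rest ih =>
    rw [List.foldl_cons, ih]
    by_cases hpa : a = p.2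
    · subst hpa
      rw [PySem.Dict.getD_modify_self, PySem.Set.mem_add]
      constructor
      · rintro ((h | h) | h)
        · exact Or.inl h
        · exact Or.inr ⟨p, List.mem_cons_self, h.symm, rfl⟩
        · obtain ⟨q, hq, hq1, hq2⟩ := h
          exact Or.inr ⟨q, List.mem_cons_of_mem _ hq, hq1, hq2⟩
      · rintro (h | ⟨q, hq, hq1, hq2⟩)
        · exact Or.inl (Or.inl h)
        · rcases List.mem_cons.mp hq with rfl | hq
          · exact Or.inl (Or.inr hq1.symm)
          · exact Or.inr ⟨q, hq, hq1, hq2⟩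
    · rw [PySem.Dict.getD_modify_of_ne _ _ _ hpa]
      constructor
      · rintro (h | ⟨q, hq, hq1, hq2⟩)
        · exact Or.inl h
        · exact Or.inr ⟨q, List.mem_cons_of_mem _ hq, hq1, hq2⟩
      · rintro (h | ⟨q, hq, hq1, hq2⟩)
        · exact Or.inl h
        · rcases List.mem_cons.mp hq with rfl | hq
          · exact absurd hq2.symm hpa
          · exact Or.inr ⟨q, hq, hq1, hq2⟩

-- the stability test of A and the index-based test of B agree on every extension
theorem pv_stable_eq (arguments : List String) (attacks : List (String × String)) (ext : List String) :
    (arguments.all (fun argument => ext.contains argument || does_set_attack argument ext attacks))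
    = (arguments.all (fun a =>
        PySem.Set.contains (PySem.Set.ofList ext) a ||
        !(PySem.Set.isdisjoint (PySem.Set.ofList ext)
            (PySem.Dict.getD (attacks.foldl (fun d p => PySem.Dict.modify d p.2 PySem.Set.empty (fun st => PySem.Set.add st p.1)) PySem.Dict.empty) a PySem.Set.empty)))) := by
  refine List.all_congr rfl (fun a => ?_)
  rw [Bool.eq_iff_iff]
  simp only [Bool.or_eq_true, List.contains_iff_mem, does_set_attack, List.any_eq_true,
    Bool.and_eq_true, beq_iff_eq, PySem.Set.contains_iff, PySem.Set.mem_ofList,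
    Bool.not_eq_true', Bool.eq_false_iff, Ne, PySem.Set.isdisjoint_iff]
  constructor
  · rintro (h | ⟨p, hp, hp2, hp1⟩)
    · exact Or.inl h
    · refine Or.inr (fun hdis => hdis p.1 hp1 ?_)
      rw [pv_mem_attackers]
      exact Or.inr ⟨p, hp, rfl, hp2⟩
  · rintro (h | h)
    · exact Or.inl h
    · push Not at h
      obtain ⟨x, hxm, hxa⟩ := h
      rw [pv_mem_attackers] at hxa
      rcases hxa with hxa | ⟨p, hp, hp1, hp2⟩
      · simp [PySem.Dict.getD_empty] at hxa
      · exact Or.inr ⟨p, hp, hp2, hp1 ▸ hxm⟩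

-- ===== VERDICT (by name: the statement is the Claim_ definition above) =====
theorem generate_stable_extensions_faster_spec : Claim_equal_generate_stable_extensions_faster := by
  intro arguments attacks preferred_extensions _
  unfold Spec_generate_stable_extensions_faster
  unfold generate_stable_extensions_faster generate_stable_extensions_faster_alt
  apply PySem.List.foldl_congr_mem
  intro st ext _
  rw [pv_stable_eq arguments attacks ext]
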